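-- pv_equiv track=rewrite | github.com/aleko2144/Hard-Truck-1-2-Blender-plugins | src/2.80/addons/b3d_tools/b3d/imghelp.py | getARGBBitMask
-- ===== SOURCE A (Python) =====
-- def getARGBBitMask(imageFormat):
--     offset = 0
--     bitMasks = []
--     for i in range(3, -1, -1):
--         curInt = int(imageFormat[i])
--         if curInt == 0:
--             formatInt = 0
--         else:
--             formatInt = 1
--             for j in range(curInt-1):
--                 formatInt = formatInt << 1
--                 formatInt += 1
--         formatInt = formatInt << offset
--         bitMasks.append(formatInt)
--         offset += curInt
--
--     return bitMasks[::-1] #reverse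
-- ===== SOURCE B (Python) =====
-- def getARGBBitMask(imageFormat):
--     w = [int(imageFormat[i]) for i in range(4)]
--     return [((1 << w[i]) - 1) << sum(w[i + 1:]) for i in range(4)]
-- ===== Notes on version B (the rewrite author's own statement) =====
-- stated objective: faster
-- what changed: Replaces the backward loop with a running offset accumulator, a hand-rolled shift-one-bit-at-a-time mask loop and a final list reversal by a forward comprehension computing each mask in closed form ((1<<w)-1) shifted by the suffix sum of the remaining widths.
-- outside the precondition, e.g. on getARGBBitMask([1, -1, 1, 1]): A returns [2, 4, 2, 1], B raises ValueError
import Mathlib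
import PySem

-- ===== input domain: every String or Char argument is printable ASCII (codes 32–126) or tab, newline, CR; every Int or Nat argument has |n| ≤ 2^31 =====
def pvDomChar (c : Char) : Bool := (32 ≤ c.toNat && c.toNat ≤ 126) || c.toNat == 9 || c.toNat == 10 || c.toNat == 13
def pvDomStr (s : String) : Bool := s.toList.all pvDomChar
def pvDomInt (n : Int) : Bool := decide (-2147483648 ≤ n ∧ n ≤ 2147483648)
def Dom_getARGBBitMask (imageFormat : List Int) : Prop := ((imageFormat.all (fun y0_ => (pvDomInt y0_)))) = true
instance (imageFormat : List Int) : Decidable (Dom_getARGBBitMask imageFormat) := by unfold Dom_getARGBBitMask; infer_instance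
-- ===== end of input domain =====

-- B computes each mask in closed form with a forward comprehension (suffix-sum shifts) instead of
-- A's backward loop with a running offset, per-bit mask building and final reversal; equivalence is
-- about the return value on the natural domain (length ≥ 4, nonnegative widths).

-- ===== PORT A =====
-- Python '<<' raises on a negative shift; Pre_ keeps all shift amounts nonnegative, where
-- 'x <<< n' is exactly 'x * 2 ^ n.toNat'.
def getARGBBitMask (imageFormat : List Int) : List Int :=
  let st := (PySem.List.pyRange 3 (-1) (-1)).foldl
    (fun (st : Int × List Int) i =>
      let curInt := PySem.List.pyGetD imageFormat i 0
      let formatInt : Int :=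
        if curInt == 0 then 0
        else (PySem.List.pyRange 0 (curInt - 1) 1).foldl (fun f _ => f * 2 + 1) 1
      let formatInt := formatInt * 2 ^ st.1.toNat
      (st.1 + curInt, st.2 ++ [formatInt]))
    ((0 : Int), ([] : List Int))
  st.2.reverse

-- ===== PORT B =====
-- '(1 <<< w) - 1' and the suffix-sum shift are exact for the nonnegative widths Pre_ admits.
def getARGBBitMask_alt (imageFormat : List Int) : List Int :=
  let w := (PySem.List.pyRange 0 4 1).map (fun i => PySem.List.pyGetD imageFormat i 0)
  (PySem.List.pyRange 0 4 1).map (fun i =>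
    (2 ^ (PySem.List.pyGetD w i 0).toNat - 1) *
      2 ^ (PySem.List.slice w (some (i + 1)) none).sum.toNat)

-- ===== PRECONDITION & SPEC =====
-- Pre_ restricts to the function's natural domain: at least four entries (A indexes [0..3];
-- fewer raises IndexError) and the four bit widths nonnegative (a negative width is not a
-- meaningful pixel format: A raises ValueError on a negative shift for some such inputs and on
-- the rest returns an accidental value, while B raises ValueError on all of them).
def Pre_getARGBBitMask (imageFormat : List Int) : Prop :=
  4 ≤ imageFormat.length ∧ ((imageFormat.take 4).all (fun x => 0 ≤ x)) = true
instance (imageFormat : List Int) : Decidable (Pre_getARGBBitMask imageFormat) := by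
  unfold Pre_getARGBBitMask; infer_instance

def pvWitness_getARGBBitMask : List Int := [8, 8, 8, 8]

def Spec_getARGBBitMask (imageFormat : List Int) (out : List Int) : Prop := out = getARGBBitMask_alt imageFormat
instance (imageFormat : List Int) (out : List Int) : Decidable (Spec_getARGBBitMask imageFormat out) := by unfold Spec_getARGBBitMask; infer_instance

-- ===== CLAIM (what is proved, stated in full; the proofs are below) =====
def Claim_equal_getARGBBitMask : Prop := ∀ (imageFormat : List Int), Dom_getARGBBitMask imageFormat → Pre_getARGBBitMask imageFormat → Spec_getARGBBitMask imageFormat (getARGBBitMask imageFormat)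

-- ===== LEMMAS AND PROOFS =====

-- A's inner per-bit loop: run n times from x, it yields x*2^n + (2^n - 1).
theorem pv_maskLoop (n : Nat) (x : Int) :
    (PySem.List.pyRange 0 (n : Int) 1).foldl (fun f _ => f * 2 + 1) x
      = x * 2 ^ n + (2 ^ n - 1) := by
  induction n generalizing x with
  | zero => simp [PySem.List.pyRange]
  | succ m ih =>
    rw [show ((m + 1 : Nat) : Int) = (m : Int) + 1 by push_cast; ring,
        PySem.List.pyRange_one_succ_right (by omega)]
    rw [List.foldl_append, ih]
    simp [pow_succ]; ring

-- A's mask expression (zero branch included) equals 2^c - 1 for 0 ≤ c.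
theorem pv_maskEq (c : Int) (hc : 0 ≤ c) :
    (if c = 0 then (0 : Int)
     else (PySem.List.pyRange 0 (c - 1) 1).foldl (fun f _ => f * 2 + 1) 1)
      = 2 ^ c.toNat - 1 := by
  by_cases h : c = 0
  · simp [h]
  · have h1 : 1 ≤ c := by omega
    have : c - 1 = ((c.toNat - 1 : Nat) : Int) := by omega
    rw [if_neg h, this, pv_maskLoop]
    have hp : (2 : Int) ^ c.toNat = 2 ^ (c.toNat - 1) * 2 := by
      rw [← pow_succ]; congr 1; omega
    rw [hp]; ring

-- One full entry of A (mask, shifted by 2^e) in the shape left by simp.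
theorem pv_entry (c : Int) (hc : 0 ≤ c) (e : Nat) :
    (if c = 0 then (0 : Int)
     else (PySem.List.pyRange 0 (c - 1) 1).foldl (fun f _ => f * 2 + 1) 1 * 2 ^ e)
      = (2 ^ c.toNat - 1) * 2 ^ e := by
  by_cases h : c = 0
  · simp [h]
  · have hm := pv_maskEq c hc
    rw [if_neg h] at hm
    rw [if_neg h, hm]

-- ===== VERDICT (by name: the statement is the Claim_ definition above) =====
theorem getARGBBitMask_spec : Claim_equal_getARGBBitMask := by
  intro imageFormat _ hpre
  obtain ⟨hlen, hpos⟩ := hpre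
  obtain ⟨a, r, g, b, t, rfl⟩ :
      ∃ a r g b t, imageFormat = a :: r :: g :: b :: t := by
    match imageFormat, hlen with
    | a :: r :: g :: b :: t, _ => exact ⟨a, r, g, b, t, rfl⟩
  simp only [List.take, List.all_cons, List.all_nil, Bool.and_eq_true, decide_eq_true_eq] at hpos
  obtain ⟨ha, hr, hg, hb, -⟩ := hpos
  show _ = getARGBBitMask_alt _
  have hrange : PySem.List.pyRange 3 (-1) (-1) = [3, 2, 1, 0] := by decide
  have hrange4 : PySem.List.pyRange 0 4 1 = [0, 1, 2, 3] := by decide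
  simp [getARGBBitMask, getARGBBitMask_alt, hrange, hrange4, PySem.List.pyGetD,
    PySem.List.pyGet?, PySem.List.pyIdx?, PySem.List.slice,
    show (0 : Int) ≤ (t.length : Int) + 1 + 1 + 1 from by omega,
    show (0 : Int) ≤ (t.length : Int) + 1 + 1 from by omega,
    show (2 : Int) ≤ (t.length : Int) + 1 + 1 + 1 from by omega,
    show (3 : Int) ≤ (t.length : Int) + 1 + 1 + 1 from by omega]
  refine ⟨?_, ?_, ?_, ?_⟩
  · rw [pv_entry a ha, show ((b + g + r).toNat) = ((r + (g + b)).toNat) from by omega]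
  · rw [pv_entry r hr, show ((b + g).toNat) = ((g + b).toNat) from by omega]
  · rw [pv_entry g hg]
  · rw [pv_maskEq b hb]
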